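-- pv_equiv track=rewrite | github.com/IvanKyrlan/fronteder-interview-portal-backend | tasks/views.py | extract_key_logic
-- ===== SOURCE A (Python) =====
-- def extract_key_logic(solution_code, language):
--     if not solution_code:
--         return []
--
--     lines = solution_code.split('\n')
--     key_parts = []
--     current_part = []
--
--     for line in lines:
--         stripped = line.strip()
--         if not stripped:
--             if current_part:
--                 key_parts.append('\n'.join(current_part))
--                 current_part = []
--             continue
--
--         if (language in ["javascript", "react", "css"] and (
--                 stripped.startswith('//') or stripped.startswith('/*') or stripped.startswith('*/'))) or \
--                 (language in ["python", "django"] and stripped.startswith('#')) or \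
--                 (language == "html" and stripped.startswith('<!--')) or \
--                 (language == "sql" and (stripped.startswith('--') or stripped.startswith('/*'))):
--             if current_part:
--                 key_parts.append('\n'.join(current_part))
--                 current_part = []
--             continue
--
--         current_part.append(line)
--
--     if current_part:
--         key_parts.append('\n'.join(current_part))
--     return key_parts
-- ===== SOURCE B (Python) =====
-- _COMMENT_PREFIXES = {
--     "javascript": ("//", "/*", "*/"),
--     "react": ("//", "/*", "*/"),
--     "css": ("//", "/*", "*/"),
--     "python": ("#",),
--     "django": ("#",),
--     "html": ("<!--",),
--     "sql": ("--", "/*"),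
-- }
--
--
-- def extract_key_logic(solution_code, language):
--     if not solution_code:
--         return []
--     prefixes = _COMMENT_PREFIXES.get(language, ())
--
--     def is_separator(line):
--         s = line.strip()
--         return not s or s.startswith(prefixes)
--
--     lines = solution_code.split('\n')
--     blocks = []
--     i, n = 0, len(lines)
--     while i < n:
--         if is_separator(lines[i]):
--             i += 1
--             continue
--         j = i
--         while j < n and not is_separator(lines[j]):
--             j += 1
--         blocks.append('\n'.join(lines[i:j]))
--         i = j
--     return blocks
-- ===== Notes on version B (the rewrite author's own statement) =====
-- stated objective: alternative
-- what changed: Replaces A's fold that threads a (key_parts, current_part) accumulator and re-tests the language on every line with a run-scanner: a separator predicate driven by a language->comment-prefix table, and a two-pointer loop that emits each maximal run of non-separator lines joined in one step.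
import Mathlib
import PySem

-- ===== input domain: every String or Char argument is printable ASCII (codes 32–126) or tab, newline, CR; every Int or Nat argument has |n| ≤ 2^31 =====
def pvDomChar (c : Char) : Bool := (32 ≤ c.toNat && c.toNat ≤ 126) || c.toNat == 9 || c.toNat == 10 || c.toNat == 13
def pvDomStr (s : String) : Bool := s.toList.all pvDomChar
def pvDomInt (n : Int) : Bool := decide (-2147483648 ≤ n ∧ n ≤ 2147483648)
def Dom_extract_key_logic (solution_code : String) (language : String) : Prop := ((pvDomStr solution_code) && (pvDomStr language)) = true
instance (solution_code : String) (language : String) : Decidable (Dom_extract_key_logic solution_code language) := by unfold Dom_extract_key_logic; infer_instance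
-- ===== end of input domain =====

-- B replaces A's accumulator fold with a run-scanner over a language→prefix table (objective: alternative decomposition, same cost).


-- ===== PORT A =====
def extract_key_logic (solution_code : String) (language : String) : List String :=
  if solution_code = "" then []
  else
    let lines := ((PySem.Str.split? solution_code "\n").getD [])
    let acc := lines.foldl (fun (st : List String × List String) line =>
      let stripped := PySem.Str.strip line
      if stripped = "" then
        (if st.2 = [] then st else (st.1 ++ [PySem.Str.join "\n" st.2], []))
      else if ((language == "javascript" || language == "react" || language == "css")
                 && (PySem.Str.startswith stripped "//" || PySem.Str.startswith stripped "/*"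
                      || PySem.Str.startswith stripped "*/"))
              || ((language == "python" || language == "django") && PySem.Str.startswith stripped "#")
              || (language == "html" && PySem.Str.startswith stripped "<!--")
              || (language == "sql" && (PySem.Str.startswith stripped "--"
                      || PySem.Str.startswith stripped "/*")) then
        (if st.2 = [] then st else (st.1 ++ [PySem.Str.join "\n" st.2], []))
      else (st.1, st.2 ++ [line])) ([], [])
    if acc.2 = [] then acc.1 else acc.1 ++ [PySem.Str.join "\n" acc.2]

-- ===== PORT B =====
def pvPrefixTable : PySem.Dict String (List String) :=
  PySem.Dict.ofList
    [("javascript", ["//", "/*", "*/"]), ("react", ["//", "/*", "*/"]), ("css", ["//", "/*", "*/"]),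
     ("python", ["#"]), ("django", ["#"]), ("html", ["<!--"]), ("sql", ["--", "/*"])]

def pvIsSeparator (language : String) (line : String) : Bool :=
  let s := PySem.Str.strip line
  s == "" || (PySem.Dict.getD pvPrefixTable language []).any (fun p => PySem.Str.startswith s p)

-- run-scanner: skip separator lines, emit each maximal run of non-separator lines joined by '\n'
def pvRuns (sep : String → Bool) : List String → List String
  | [] => []
  | x :: xs =>
    if sep x then pvRuns sep xs
    else
      PySem.Str.join "\n" (x :: xs.takeWhile (fun l => !sep l))
        :: pvRuns sep (xs.dropWhile (fun l => !sep l))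
termination_by xs => xs.length
decreasing_by
  all_goals
    have h := List.length_dropWhile_le (fun l => !sep l) xs
    simp only [List.length_cons]
    omega

def extract_key_logic_alt (solution_code : String) (language : String) : List String :=
  if solution_code = "" then []
  else pvRuns (pvIsSeparator language) (((PySem.Str.split? solution_code "\n").getD []))

-- ===== PRECONDITION & SPEC =====
def Spec_extract_key_logic (solution_code : String) (language : String) (out : List String) : Prop := out = extract_key_logic_alt solution_code language
instance (solution_code : String) (language : String) (out : List String) : Decidable (Spec_extract_key_logic solution_code language out) := by unfold Spec_extract_key_logic; infer_instance

-- ===== CLAIM (what is proved, stated in full; the proofs are below) =====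
def Claim_equal_extract_key_logic : Prop := ∀ (solution_code : String) (language : String), Dom_extract_key_logic solution_code language → Spec_extract_key_logic solution_code language (extract_key_logic solution_code language)

-- ===== LEMMAS AND PROOFS =====

-- A's separator test (blank or language comment prefix) coincides with B's table-driven one
lemma pv_sep_eq (language line : String) :
    (let s := PySem.Str.strip line
     (s == "") ||
     (((language == "javascript" || language == "react" || language == "css")
        && (PySem.Str.startswith s "//" || PySem.Str.startswith s "/*"
             || PySem.Str.startswith s "*/"))
      || ((language == "python" || language == "django") && PySem.Str.startswith s "#")
      || (language == "html" && PySem.Str.startswith s "<!--")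
      || (language == "sql" && (PySem.Str.startswith s "--" || PySem.Str.startswith s "/*"))))
    = pvIsSeparator language line := by
  by_cases h1 : language = "javascript"
  · subst h1
    have ht : PySem.Dict.getD pvPrefixTable "javascript" [] = ["//", "/*", "*/"] := by decide
    simp [pvIsSeparator, ht, Bool.or_assoc]
  by_cases h2 : language = "react"
  · subst h2
    have ht : PySem.Dict.getD pvPrefixTable "react" [] = ["//", "/*", "*/"] := by decide
    simp [pvIsSeparator, ht, Bool.or_assoc]
  by_cases h3 : language = "css"
  · subst h3
    have ht : PySem.Dict.getD pvPrefixTable "css" [] = ["//", "/*", "*/"] := by decide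
    simp [pvIsSeparator, ht, Bool.or_assoc]
  by_cases h4 : language = "python"
  · subst h4
    have ht : PySem.Dict.getD pvPrefixTable "python" [] = ["#"] := by decide
    simp [pvIsSeparator, ht, Bool.or_assoc]
  by_cases h5 : language = "django"
  · subst h5
    have ht : PySem.Dict.getD pvPrefixTable "django" [] = ["#"] := by decide
    simp [pvIsSeparator, ht, Bool.or_assoc]
  by_cases h6 : language = "html"
  · subst h6
    have ht : PySem.Dict.getD pvPrefixTable "html" [] = ["<!--"] := by decide
    simp [pvIsSeparator, ht, Bool.or_assoc]
  by_cases h7 : language = "sql"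
  · subst h7
    have ht : PySem.Dict.getD pvPrefixTable "sql" [] = ["--", "/*"] := by decide
    simp [pvIsSeparator, ht, Bool.or_assoc]
  have hT : pvPrefixTable = PySem.Dict.mk
      [("javascript", ["//", "/*", "*/"]), ("react", ["//", "/*", "*/"]), ("css", ["//", "/*", "*/"]),
       ("python", ["#"]), ("django", ["#"]), ("html", ["<!--"]), ("sql", ["--", "/*"])] := by decide
  have ht : PySem.Dict.getD pvPrefixTable language [] = [] := by
    rw [hT, PySem.Dict.getD_eq_get?_getD]
    rw [PySem.Dict.get?_mk_cons, PySem.Dict.get?_mk_cons, PySem.Dict.get?_mk_cons,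
        PySem.Dict.get?_mk_cons, PySem.Dict.get?_mk_cons, PySem.Dict.get?_mk_cons,
        PySem.Dict.get?_mk_cons]
    simp only [show ("javascript" == language) = false by simp [Ne.symm h1],
      show ("react" == language) = false by simp [Ne.symm h2],
      show ("css" == language) = false by simp [Ne.symm h3],
      show ("python" == language) = false by simp [Ne.symm h4],
      show ("django" == language) = false by simp [Ne.symm h5],
      show ("html" == language) = false by simp [Ne.symm h6],
      show ("sql" == language) = false by simp [Ne.symm h7]]
    rfl
  simp [pvIsSeparator, ht, show (language == "javascript") = false by simp [h1],
    show (language == "react") = false by simp [h2],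
    show (language == "css") = false by simp [h3],
    show (language == "python") = false by simp [h4],
    show (language == "django") = false by simp [h5],
    show (language == "html") = false by simp [h6],
    show (language == "sql") = false by simp [h7]]

-- generic flush step shared by both comment/blank branches of A's loop body
def pvStep (sep : String → Bool) (st : List String × List String) (line : String) :
    List String × List String :=
  if sep line then (if st.2 = [] then st else (st.1 ++ [PySem.Str.join "\n" st.2], []))
  else (st.1, st.2 ++ [line])

def pvFin (st : List String × List String) : List String :=
  if st.2 = [] then st.1 else st.1 ++ [PySem.Str.join "\n" st.2]

lemma pv_foldl_runs (sep : String → Bool) (xs : List String) :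
    ∀ kp cp, pvFin (xs.foldl (pvStep sep) (kp, cp)) =
      kp ++ (if cp = [] then pvRuns sep xs
             else PySem.Str.join "\n" (cp ++ xs.takeWhile (fun l => !sep l))
                    :: pvRuns sep (xs.dropWhile (fun l => !sep l))) := by
  induction xs with
  | nil =>
    intro kp cp
    by_cases hc : cp = [] <;> simp [pvFin, pvRuns, hc]
  | cons x xs ih =>
    intro kp cp
    by_cases hx : sep x = true
    · have hruns : pvRuns sep (x :: xs) = pvRuns sep xs := by rw [pvRuns]; simp [hx]
      have htw : List.takeWhile (fun l => !sep l) (x :: xs) = [] := by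
        simp [hx]
      have hdw : List.dropWhile (fun l => !sep l) (x :: xs) = x :: xs := by
        simp [hx]
      by_cases hc : cp = []
      · subst hc
        rw [List.foldl_cons, show pvStep sep (kp, []) x = (kp, []) from by simp [pvStep, hx],
            ih kp [], if_pos rfl, if_pos rfl, hruns]
      · rw [List.foldl_cons,
            show pvStep sep (kp, cp) x = (kp ++ [PySem.Str.join "\n" cp], []) from by
              simp [pvStep, hx, hc],
            ih _ [], if_pos rfl, if_neg hc, htw, hdw, hruns]
        simp
    · have htw : List.takeWhile (fun l => !sep l) (x :: xs)
          = x :: List.takeWhile (fun l => !sep l) xs := by simp [hx]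
      have hdw : List.dropWhile (fun l => !sep l) (x :: xs)
          = List.dropWhile (fun l => !sep l) xs := by simp [hx]
      rw [List.foldl_cons, show pvStep sep (kp, cp) x = (kp, cp ++ [x]) from by simp [pvStep, hx],
          ih kp (cp ++ [x]), if_neg (by simp)]
      by_cases hc : cp = []
      · subst hc
        rw [if_pos rfl]
        conv_rhs => rw [pvRuns]
        simp [hx]
      · rw [if_neg hc, htw, hdw]
        simp

-- ===== VERDICT (by name: the statement is the Claim_ definition above) =====
theorem extract_key_logic_spec : Claim_equal_extract_key_logic := by
  intro sc lang _
  unfold Spec_extract_key_logic extract_key_logic extract_key_logic_alt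
  by_cases h : sc = ""
  · simp [h]
  · rw [if_neg h, if_neg h]
    dsimp only
    rw [show (fun (st : List String × List String) line =>
        let stripped := PySem.Str.strip line
        if stripped = "" then
          (if st.2 = [] then st else (st.1 ++ [PySem.Str.join "\n" st.2], []))
        else if ((lang == "javascript" || lang == "react" || lang == "css")
                   && (PySem.Str.startswith stripped "//" || PySem.Str.startswith stripped "/*"
                        || PySem.Str.startswith stripped "*/"))
                || ((lang == "python" || lang == "django") && PySem.Str.startswith stripped "#")
                || (lang == "html" && PySem.Str.startswith stripped "<!--")
                || (lang == "sql" && (PySem.Str.startswith stripped "--"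
                        || PySem.Str.startswith stripped "/*")) then
          (if st.2 = [] then st else (st.1 ++ [PySem.Str.join "\n" st.2], []))
        else (st.1, st.2 ++ [line])) = pvStep (pvIsSeparator lang) from ?_]
    · have hmain := pv_foldl_runs (pvIsSeparator lang) ((PySem.Str.split? sc "\n").getD []) [] []
      rw [if_pos rfl] at hmain
      simp only [pvFin, List.nil_append] at hmain
      exact hmain
    · funext st line
      have hs := pv_sep_eq lang line
      simp only [pvStep, ← hs]
      by_cases h0 : PySem.Str.strip line = ""
      · simp [h0]
      · have hb : (PySem.Str.strip line == "") = false := by simp [h0]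
        simp [h0, hb]
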